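-- pv_equiv track=rewrite | github.com/EndeavoringOrb/tensor_graphs | tensor_graphs/compiler/propagation.py | _prod_shape
-- ===== SOURCE A (Python) =====
-- from typing import Dict, List, Tuple, Optional, Callable, Any, NamedTuple
--
-- def _prod_shape(shape: Tuple[Optional[int], ...]) -> Optional[int]:
--     if not shape:
--         return 1
--     result = 1
--     for d in shape:
--         if d is None:
--             return None
--         result *= d
--     return result
-- ===== SOURCE B (Python) =====
-- def _prod_shape(shape):
--     # Divide and conquer: split the shape at the midpoint, compute each half's
--     # product recursively, combine; None in either half propagates up.
--     if not shape:
--         return 1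
--     if len(shape) == 1:
--         return shape[0]
--     mid = len(shape) // 2
--     left = _prod_shape(shape[:mid])
--     right = _prod_shape(shape[mid:])
--     if left is None or right is None:
--         return None
--     return left * right
-- ===== Notes on version B (the rewrite author's own statement) =====
-- stated objective: alternative
-- what changed: Replaced A's left-to-right accumulating loop with early None-exit by a balanced divide-and-conquer recursion that splits the shape at its midpoint, computes each half's product and combines them, propagating None upward.
import Mathlib
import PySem

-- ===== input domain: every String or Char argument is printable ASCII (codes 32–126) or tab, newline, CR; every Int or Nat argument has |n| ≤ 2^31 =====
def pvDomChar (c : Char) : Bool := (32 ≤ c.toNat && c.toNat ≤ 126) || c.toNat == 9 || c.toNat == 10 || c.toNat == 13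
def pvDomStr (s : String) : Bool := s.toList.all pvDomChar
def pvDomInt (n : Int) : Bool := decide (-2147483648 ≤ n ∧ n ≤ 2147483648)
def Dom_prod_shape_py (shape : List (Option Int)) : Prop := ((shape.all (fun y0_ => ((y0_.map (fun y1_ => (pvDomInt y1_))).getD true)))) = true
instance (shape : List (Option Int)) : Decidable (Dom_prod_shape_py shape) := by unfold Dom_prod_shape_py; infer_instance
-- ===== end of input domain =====

-- B replaces A's left-to-right accumulator loop with early exit by a balanced
-- divide-and-conquer on the list (alternative decomposition, not faster).


-- ===== PORT A =====
-- loop: for d in shape: if d is None: return None; result *= d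
def prodShapeLoop (result : Int) : List (Option Int) → Option Int
  | [] => some result
  | none :: _ => none
  | some d :: rest => prodShapeLoop (result * d) rest

def prod_shape_py (shape : List (Option Int)) : Option Int :=
  if shape = [] then some 1 else prodShapeLoop 1 shape

-- ===== PORT B =====
-- divide and conquer: shape[:mid] / shape[mid:] with 0 ≤ mid ≤ len are exactly
-- List.take mid / List.drop mid; shape[0] on a length-1 list is getD 0 none (exact here).
def prod_shape_py_alt (shape : List (Option Int)) : Option Int :=
  if shape = [] then some 1
  else if shape.length = 1 then shape.getD 0 none
  else
    let mid := shape.length / 2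
    match prod_shape_py_alt (shape.take mid), prod_shape_py_alt (shape.drop mid) with
    | some l, some r => some (l * r)
    | _, _ => none
termination_by shape.length
decreasing_by
  · have : shape.length ≥ 2 := by
      rcases shape with _ | ⟨a, _ | ⟨b, t⟩⟩ <;> simp_all
    simp [List.length_take]; omega
  · have : shape.length ≥ 2 := by
      rcases shape with _ | ⟨a, _ | ⟨b, t⟩⟩ <;> simp_all
    simp [List.length_drop]; omega

-- ===== PRECONDITION & SPEC =====
def Spec_prod_shape_py (shape : List (Option Int)) (out : Option Int) : Prop := out = prod_shape_py_alt shape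
instance (shape : List (Option Int)) (out : Option Int) : Decidable (Spec_prod_shape_py shape out) := by unfold Spec_prod_shape_py; infer_instance

-- ===== CLAIM (what is proved, stated in full; the proofs are below) =====
def Claim_equal_prod_shape_py : Prop := ∀ (shape : List (Option Int)), Dom_prod_shape_py shape → Spec_prod_shape_py shape (prod_shape_py shape)

-- ===== LEMMAS AND PROOFS =====
-- closed characterisation shared by both ports
def prodNF (shape : List (Option Int)) : Option Int :=
  if none ∈ shape then none else some (shape.filterMap id).prod

theorem prodShapeLoop_eq (shape : List (Option Int)) : ∀ (acc : Int),
    prodShapeLoop acc shape = (prodNF shape).map (fun p => acc * p) := by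
  induction shape with
  | nil => intro acc; simp [prodShapeLoop, prodNF]
  | cons h t ih =>
    intro acc
    cases h with
    | none => simp [prodShapeLoop, prodNF]
    | some d =>
      rw [prodShapeLoop, ih (acc * d)]
      by_cases hm : none ∈ t
      · simp [prodNF, hm]
      · simp [prodNF, hm, mul_assoc]

theorem prodNF_append (xs ys : List (Option Int)) :
    prodNF (xs ++ ys) = match prodNF xs, prodNF ys with
      | some l, some r => some (l * r)
      | _, _ => none := by
  by_cases hx : none ∈ xs <;> by_cases hy : none ∈ ys <;>
    simp [prodNF, hx, hy, List.filterMap_append]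

theorem alt_eq_NF : ∀ (n : Nat) (shape : List (Option Int)), shape.length ≤ n →
    prod_shape_py_alt shape = prodNF shape := by
  intro n
  induction n with
  | zero =>
    intro shape hlen
    have : shape = [] := List.eq_nil_of_length_eq_zero (Nat.le_zero.mp hlen)
    subst this; simp [prod_shape_py_alt, prodNF]
  | succ m ih =>
    intro shape hlen
    rw [prod_shape_py_alt]
    by_cases h0 : shape = []
    · simp [h0, prodNF]
    · rw [if_neg h0]
      by_cases h1 : shape.length = 1
      · rcases shape with _ | ⟨a, _ | ⟨b, t⟩⟩ <;> simp_all
        cases a <;> simp [prodNF]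
      · rw [if_neg h1]
        show (match prod_shape_py_alt (List.take (shape.length / 2) shape),
                    prod_shape_py_alt (List.drop (shape.length / 2) shape) with
              | some l, some r => some (l * r)
              | _, _ => none) = prodNF shape
        have hge : 2 ≤ shape.length := by
          rcases shape with _ | ⟨a, _ | ⟨b, t⟩⟩ <;> simp_all
        have hmidlt : shape.length / 2 < shape.length := by omega
        have hmidpos : 1 ≤ shape.length / 2 := by omega
        rw [ih _ (by simp [List.length_take]; omega),
            ih _ (by simp [List.length_drop]; omega)]
        have := prodNF_append (shape.take (shape.length / 2)) (shape.drop (shape.length / 2))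
        rw [List.take_append_drop] at this
        exact this.symm

-- ===== VERDICT (by name: the statement is the Claim_ definition above) =====
theorem prod_shape_py_spec : Claim_equal_prod_shape_py := by
  intro shape _
  unfold Spec_prod_shape_py prod_shape_py
  rw [alt_eq_NF shape.length shape le_rfl]
  rcases shape with _ | ⟨h, t⟩
  · simp [prodNF]
  · rw [if_neg (by simp), prodShapeLoop_eq]
    cases prodNF (h :: t) <;> simp
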